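-- pv_equiv track=rewrite | github.com/Leon279/Meeting-Point-Algorithmus | main.py | generateX2
-- ===== SOURCE A (Python) =====
-- def generateX2(X, subset):
--     X2 = []
--     for element in X:
--         if element not in X2:
--             X2.append(element)
--     for element in subset:
--         if element not in X2:
--             X2.append(element)
--     X2.sort()
--     return X2
-- ===== SOURCE B (Python) =====
-- def generateX2(X, subset):
--     merged = sorted(X + subset)
--     res = []
--     for e in merged:
--         if not res or res[-1] != e:
--             res.append(e)
--     return res
-- ===== Notes on version B (the rewrite author's own statement) =====
-- stated objective: faster
-- what changed: Replaces A's quadratic repeated-membership dedup followed by sort with sort-first then a single linear pass removing adjacent duplicates.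
import Mathlib
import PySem

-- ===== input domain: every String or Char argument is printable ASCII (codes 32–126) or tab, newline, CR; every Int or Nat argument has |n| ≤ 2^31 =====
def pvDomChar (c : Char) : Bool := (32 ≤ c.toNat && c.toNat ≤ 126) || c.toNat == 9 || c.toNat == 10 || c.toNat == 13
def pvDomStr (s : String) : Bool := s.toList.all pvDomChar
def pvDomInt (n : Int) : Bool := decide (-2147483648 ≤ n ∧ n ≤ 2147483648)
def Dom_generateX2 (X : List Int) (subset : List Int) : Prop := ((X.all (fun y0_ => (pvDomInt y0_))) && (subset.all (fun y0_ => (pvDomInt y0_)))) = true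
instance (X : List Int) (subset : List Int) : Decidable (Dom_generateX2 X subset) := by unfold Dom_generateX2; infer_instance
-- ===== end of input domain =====

-- B replaces A's quadratic repeated-membership dedup + sort with sort-first then one adjacent-duplicate-removal pass (measurably faster).
-- ===== PORT A =====
def generateX2 (X : List Int) (subset : List Int) : List Int :=
  let X2 := X.foldl (fun acc e => if e ∈ acc then acc else acc ++ [e]) []
  let X2 := subset.foldl (fun acc e => if e ∈ acc then acc else acc ++ [e]) X2
  PySem.List.sorted X2 (fun x => x) false

-- ===== PORT B =====
def generateX2_alt (X : List Int) (subset : List Int) : List Int :=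
  let merged := PySem.List.sorted (X ++ subset) (fun x => x) false
  merged.foldl (fun res e => if res.getLast? = some e then res else res ++ [e]) []

-- ===== PRECONDITION & SPEC =====
def Spec_generateX2 (X : List Int) (subset : List Int) (out : List Int) : Prop := out = generateX2_alt X subset
instance (X : List Int) (subset : List Int) (out : List Int) : Decidable (Spec_generateX2 X subset out) := by unfold Spec_generateX2; infer_instance

-- ===== CLAIM (what is proved, stated in full; the proofs are below) =====
def Claim_equal_generateX2 : Prop := ∀ (X : List Int) (subset : List Int), Dom_generateX2 X subset → Spec_generateX2 X subset (generateX2 X subset)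

-- ===== LEMMAS AND PROOFS =====

-- A's dedup loop: the accumulator stays duplicate-free and collects exactly acc ∪ xs.
theorem loopA (xs : List Int) : ∀ (acc : List Int), acc.Nodup →
    (List.foldl (fun acc e => if e ∈ acc then acc else acc ++ [e]) acc xs).Nodup ∧
    (∀ y, y ∈ List.foldl (fun acc e => if e ∈ acc then acc else acc ++ [e]) acc xs ↔
      y ∈ acc ∨ y ∈ xs) := by
  induction xs with
  | nil => intro acc h; simpa using h
  | cons e rest ih =>
      intro acc h
      simp only [List.foldl_cons]
      by_cases he : e ∈ acc
      · simp only [if_pos he]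
        obtain ⟨h1, h2⟩ := ih acc h
        refine ⟨h1, fun y => ?_⟩
        rw [h2]
        constructor
        · rintro (hy | hy) <;> simp [hy]
        · rintro (hy | hy)
          · exact Or.inl hy
          · rcases List.mem_cons.mp hy with rfl | hy
            · exact Or.inl he
            · exact Or.inr hy
      · simp only [if_neg he]
        have hnd : (acc ++ [e]).Nodup := by
          rw [List.nodup_append]
          refine ⟨h, List.nodup_singleton e, ?_⟩
          intro a ha b hb
          obtain rfl := List.mem_singleton.mp hb
          exact fun hab => he (hab ▸ ha)
        obtain ⟨h1, h2⟩ := ih (acc ++ [e]) hnd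
        refine ⟨h1, fun y => ?_⟩
        rw [h2]
        simp [or_assoc, List.mem_append]

-- in a strictly increasing list every element is ≤ the last one
theorem le_getLast (acc : List Int) (hs : acc.Pairwise (· < ·)) :
    ∀ a ∈ acc, ∀ l, acc.getLast? = some l → a ≤ l := by
  induction acc with
  | nil => simp
  | cons x t ih =>
      intro a ha l hl
      cases t with
      | nil =>
          simp at ha hl; omega
      | cons y t' =>
          rw [List.getLast?_cons_cons] at hl
          rcases List.mem_cons.mp ha with rfl | ha
          · have hx : ∀ b ∈ y :: t', a < b := (List.pairwise_cons.mp hs).1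
            exact le_of_lt (hx l (List.mem_of_getLast? hl))
          · exact ih (List.pairwise_cons.mp hs).2 a ha l hl

-- B's pass: on a weakly sorted input it keeps the output strictly increasing
-- and collects exactly acc ∪ xs.
theorem loopB (xs : List Int) : ∀ (acc : List Int), acc.Pairwise (· < ·) →
    xs.Pairwise (· ≤ ·) → (∀ a ∈ acc, ∀ y ∈ xs, a ≤ y) →
    (List.foldl (fun res e => if res.getLast? = some e then res else res ++ [e]) acc xs).Pairwise (· < ·) ∧
    (∀ y, y ∈ List.foldl (fun res e => if res.getLast? = some e then res else res ++ [e]) acc xs ↔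
      y ∈ acc ∨ y ∈ xs) := by
  induction xs with
  | nil => intro acc h _ _; simpa using h
  | cons e rest ih =>
      intro acc hs hx hb
      have hxr : rest.Pairwise (· ≤ ·) := (List.pairwise_cons.mp hx).2
      have hxe : ∀ y ∈ rest, e ≤ y := (List.pairwise_cons.mp hx).1
      simp only [List.foldl_cons]
      by_cases hl : acc.getLast? = some e
      · simp only [if_pos hl]
        have hemem : e ∈ acc := List.mem_of_getLast? hl
        have hb' : ∀ a ∈ acc, ∀ y ∈ rest, a ≤ y := fun a ha y hy => hb a ha y (by simp [hy])
        obtain ⟨h1, h2⟩ := ih acc hs hxr hb'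
        refine ⟨h1, fun y => ?_⟩
        rw [h2]
        constructor
        · rintro (hy | hy) <;> simp [hy]
        · rintro (hy | hy)
          · exact Or.inl hy
          · rcases List.mem_cons.mp hy with rfl | hy
            · exact Or.inl hemem
            · exact Or.inr hy
      · simp only [if_neg hl]
        have hlt : ∀ a ∈ acc, a < e := by
          intro a ha
          cases hcase : acc.getLast? with
          | none =>
              rw [List.getLast?_eq_none_iff] at hcase
              subst hcase; simp at ha
          | some l =>
              have hal : a ≤ l := le_getLast acc hs a ha l hcase
              have hlmem : l ∈ acc := List.mem_of_getLast? hcase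
              have hle : l ≤ e := hb l hlmem e (by simp)
              have hne : l ≠ e := fun h => hl (by rw [hcase, h])
              omega
        have hs' : (acc ++ [e]).Pairwise (· < ·) := by
          rw [List.pairwise_append]
          exact ⟨hs, by simp, by simpa using hlt⟩
        have hb' : ∀ a ∈ acc ++ [e], ∀ y ∈ rest, a ≤ y := by
          intro a ha y hy
          rcases List.mem_append.mp ha with ha | ha
          · exact hb a ha y (by simp [hy])
          · simp at ha; subst ha; exact hxe y hy
        obtain ⟨h1, h2⟩ := ih (acc ++ [e]) hs' hxr hb'
        refine ⟨h1, fun y => ?_⟩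
        rw [h2]
        simp [or_assoc, List.mem_append]

-- ===== VERDICT (by name: the statement is the Claim_ definition above) =====
theorem generateX2_spec : Claim_equal_generateX2 := by
  intro X subset _
  unfold Spec_generateX2 generateX2 generateX2_alt
  simp only [← List.foldl_append]
  set xs := X ++ subset with hxs
  set dA := List.foldl (fun acc e => if e ∈ acc then acc else acc ++ [e]) [] xs with hdA
  set M := PySem.List.sorted xs (fun x => x) false with hM
  set dB := List.foldl (fun res e => if res.getLast? = some e then res else res ++ [e]) [] M with hdB
  obtain ⟨hAnd, hAmem⟩ := loopA xs [] (by simp)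
  have hMsorted : M.Pairwise (· ≤ ·) := by
    simpa using PySem.List.sorted_pairwise (xs := xs) (key := fun x => x)
  obtain ⟨hBlt, hBmem⟩ := loopB M [] (by simp) hMsorted (by simp)
  have hmemM : ∀ y, y ∈ M ↔ y ∈ xs := fun y => PySem.List.mem_sorted xs (fun x => x) false y
  have hBnd : dB.Nodup := hBlt.nodup
  have hperm : dB.Perm dA := by
    rw [List.perm_ext_iff_of_nodup hBnd hAnd]
    intro y
    rw [hBmem y, hAmem y, hmemM y]
  exact PySem.List.sorted_id_eq_of_perm_of_pairwise dA dB hperm (hBlt.imp le_of_lt)
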